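-- pv_equiv track=rewrite | github.com/Aniket-404/Tech-M | sum_of_prime_in_range.py | sum_prime
-- ===== SOURCE A (Python) =====
-- def is_prime(n):
--     if n<2:
--         return False
--     for i in range(2,n):
--         if n%i==0:
--             return False
--     return True
--
-- def sum_prime(start,end):
--     primes = []
--     for num in range(start, end+1):
--         if is_prime(num):
--             primes.append(num)
--
--     if primes:
--         return primes[0] + primes[-1]
--     return 0
-- ===== SOURCE B (Python) =====
-- def _is_prime_fast(n):
--     if n < 2:
--         return False
--     i = 2
--     while i * i <= n:
--         if n % i == 0:
--             return False
--         i += 1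
--     return True
--
-- def sum_prime(start, end):
--     num = max(start, 2)
--     while num <= end:
--         if _is_prime_fast(num):
--             break
--         num += 1
--     else:
--         return 0
--     first = num
--     num = end
--     while not _is_prime_fast(num):
--         num -= 1
--     return first + num
-- ===== Notes on version B (the rewrite author's own statement) =====
-- stated objective: alternative
-- what changed: Instead of collecting every prime of the range with O(n) trial division, B scans upward from max(start,2) for the first prime and downward from end for the last, each tested with trial division only up to sqrt(n).
import Mathlib
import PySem

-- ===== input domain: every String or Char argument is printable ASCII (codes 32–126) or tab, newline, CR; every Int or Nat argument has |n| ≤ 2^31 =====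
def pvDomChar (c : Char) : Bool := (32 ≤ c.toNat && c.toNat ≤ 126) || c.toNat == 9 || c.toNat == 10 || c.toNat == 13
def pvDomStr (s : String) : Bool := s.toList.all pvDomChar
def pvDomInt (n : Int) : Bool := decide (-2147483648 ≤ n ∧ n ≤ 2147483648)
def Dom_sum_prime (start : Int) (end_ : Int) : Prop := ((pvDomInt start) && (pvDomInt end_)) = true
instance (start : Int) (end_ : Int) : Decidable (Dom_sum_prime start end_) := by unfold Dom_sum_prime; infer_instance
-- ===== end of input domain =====

-- B replaces A's "collect all primes of the range" strategy by two boundary scans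
-- (first prime upward from max(start,2), last prime downward from end) with sqrt-bounded
-- trial division; objective: alternative algorithm.


-- ===== PORT A =====
-- is_prime(n): trial division over the whole range(2, n)
def is_prime (n : Int) : Bool :=
  if n < 2 then false
  else (PySem.List.pyRange 2 n 1).all (fun i => !(PySem.Int.mod n i == 0))

def sum_prime (start : Int) (end_ : Int) : Int :=
  let primes := (PySem.List.pyRange start (end_ + 1) 1).foldl
    (fun acc num => if is_prime num then acc ++ [num] else acc) []
  if primes.isEmpty then 0
  else primes.headD 0 + primes.getLastD 0

-- ===== PORT B =====
-- while i*i <= n: … ; i += 1   — fuel n.toNat bounds the iteration count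
def trialLoop (n i : Int) (fuel : Nat) : Bool :=
  match fuel with
  | 0 => true
  | f + 1 =>
    if i * i ≤ n then
      (if PySem.Int.mod n i == 0 then false else trialLoop n (i + 1) f)
    else true

def is_prime_fast (n : Int) : Bool :=
  if n < 2 then false else trialLoop n 2 n.toNat

-- first while loop of B: scan num, num+1, …; fuel counts down to the `else: return 0` exit
def scanUp (num : Int) (fuel : Nat) : Option Int :=
  match fuel with
  | 0 => none
  | f + 1 => if is_prime_fast num then some num else scanUp (num + 1) f

-- second while loop of B: scan num, num-1, …; always reaches a prime (`first`) before fuel 0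
def scanDown (num : Int) (fuel : Nat) : Int :=
  match fuel with
  | 0 => num
  | f + 1 => if is_prime_fast num then num else scanDown (num - 1) f

def sum_prime_alt (start : Int) (end_ : Int) : Int :=
  let lo := max start 2
  match scanUp lo (end_ + 1 - lo).toNat with
  | none => 0
  | some first => first + scanDown end_ ((end_ - first).toNat + 1)

-- ===== PRECONDITION & SPEC =====
def Spec_sum_prime (start : Int) (end_ : Int) (out : Int) : Prop := out = sum_prime_alt start end_
instance (start : Int) (end_ : Int) (out : Int) : Decidable (Spec_sum_prime start end_ out) := by unfold Spec_sum_prime; infer_instance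

-- ===== CLAIM (what is proved, stated in full; the proofs are below) =====
def Claim_equal_sum_prime : Prop := ∀ (start : Int) (end_ : Int), Dom_sum_prime start end_ → Spec_sum_prime start end_ (sum_prime start end_)

-- ===== LEMMAS AND PROOFS =====

-- A's primality test says: no divisor in [2, n)
theorem is_prime_iff (n : Int) (hn : 2 ≤ n) :
    is_prime n = true ↔ ∀ i : Int, 2 ≤ i → i < n → ¬ (i ∣ n) := by
  simp only [is_prime, if_neg (by omega : ¬ n < 2), List.all_eq_true, PySem.List.mem_pyRange_one,
    Bool.not_eq_eq_eq_not, Bool.not_true, beq_eq_false_iff_ne, ne_eq]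
  constructor
  · intro h i h2 hi hd
    exact h i ⟨h2, hi⟩ ((PySem.Int.mod_eq_zero_iff_dvd n i).mpr hd)
  · intro h i ⟨h2, hi⟩ hm
    exact h i h2 hi ((PySem.Int.mod_eq_zero_iff_dvd n i).mp hm)

-- B's trial loop says: no divisor j ≥ i with j*j ≤ n (given enough fuel)
theorem trialLoop_iff (n : Int) (fuel : Nat) : ∀ i : Int, 2 ≤ i → n < (i + fuel) * (i + fuel) →
    (trialLoop n i fuel = true ↔ ∀ j : Int, i ≤ j → j * j ≤ n → ¬ (j ∣ n)) := by
  induction fuel with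
  | zero =>
    intro i h2 hf
    simp only [trialLoop, Nat.cast_zero, add_zero] at *
    constructor
    · intro _ j hij hjj hd
      nlinarith
    · intro _; trivial
  | succ f ih =>
    intro i h2 hf
    simp only [trialLoop]
    by_cases hii : i * i ≤ n
    · rw [if_pos hii]
      by_cases hm : PySem.Int.mod n i == 0
      · rw [if_pos hm]
        simp only [Bool.false_eq_true, false_iff]
        push Not
        exact ⟨i, le_refl i, hii, (PySem.Int.mod_eq_zero_iff_dvd n i).mp (by simpa using hm)⟩
      · rw [if_neg hm]
        have hnd : ¬ (i ∣ n) := fun hd => hm (by simp [(PySem.Int.mod_eq_zero_iff_dvd n i).mpr hd])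
        rw [ih (i+1) (by omega) (by push_cast at hf ⊢; nlinarith)]
        constructor
        · intro h j hij hjj hd
          rcases eq_or_lt_of_le hij with rfl | hlt
          · exact hnd hd
          · exact h j (by omega) hjj hd
        · intro h j hij hjj hd
          exact h j (by omega) hjj hd
    · rw [if_neg hii]
      constructor
      · intro _ j hij hjj hd
        nlinarith
      · intro _; trivial

-- the sqrt argument: a divisor in [2, n) yields one with j*j ≤ n, and conversely
theorem divisor_iff (n : Int) (hn : 2 ≤ n) :
    (∀ i : Int, 2 ≤ i → i < n → ¬ (i ∣ n)) ↔ (∀ j : Int, 2 ≤ j → j * j ≤ n → ¬ (j ∣ n)) := by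
  constructor
  · intro h j h2 hjj
    exact h j h2 (by nlinarith)
  · intro h i h2 hi hd
    obtain ⟨k, hk⟩ := hd
    have hk2 : 2 ≤ k := by nlinarith
    rcases le_or_gt i k with hle | hlt
    · exact h i h2 (by nlinarith) ⟨k, hk⟩
    · exact h k hk2 (by nlinarith) ⟨i, by rw [hk]; ring⟩

-- the two primality tests agree
theorem isp_eq (n : Int) : is_prime_fast n = is_prime n := by
  by_cases h : n < 2
  · simp [is_prime_fast, is_prime, h]
  · have hn : 2 ≤ n := by omega
    have hc : (n.toNat : Int) = n := Int.toNat_of_nonneg (by omega)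
    have hfuel : n < ((2:Int) + n.toNat) * (2 + n.toNat) := by rw [hc]; nlinarith
    have h1 := trialLoop_iff n n.toNat 2 (le_refl 2) hfuel
    have h2 : (∀ j : Int, 2 ≤ j → j * j ≤ n → ¬ (j ∣ n)) ↔ is_prime n = true :=
      ((divisor_iff n hn).symm.trans (is_prime_iff n hn).symm)
    simp only [is_prime_fast, if_neg h]
    rw [Bool.eq_iff_iff, h1, h2]

theorem isp_fun_eq : is_prime_fast = is_prime := funext isp_eq

-- scanUp finds the head of the filtered window
theorem scanUp_eq (fuel : Nat) : ∀ a : Int,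
    scanUp a fuel = ((PySem.List.pyRange a (a + fuel) 1).filter is_prime_fast).head? := by
  induction fuel with
  | zero =>
    intro a
    simp [scanUp]
  | succ f ih =>
    intro a
    rw [PySem.List.pyRange_one_cons (by push_cast; omega : a < a + ((f:Nat)+1:Nat))]
    simp only [scanUp, List.filter_cons]
    by_cases hp : is_prime_fast a
    · simp [hp]
    · simp only [hp, Bool.false_eq_true, if_false]
      rw [ih (a+1)]
      congr 1
      push_cast
      ring_nf

-- scanDown finds the last of the filtered window, provided its lowest cell is prime
theorem scanDown_eq (fuel : Nat) : ∀ b : Int, is_prime_fast (b - fuel) = true →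
    scanDown b (fuel + 1) = ((PySem.List.pyRange (b - fuel) (b + 1) 1).filter is_prime_fast).getLastD 0 := by
  induction fuel with
  | zero =>
    intro b hb
    simp only [Nat.cast_zero, sub_zero] at hb ⊢
    rw [PySem.List.pyRange_one_singleton]
    simp [scanDown, hb]
  | succ f ih =>
    intro b hb
    have hstep : scanDown b (f + 1 + 1) = if is_prime_fast b then b else scanDown (b - 1) (f + 1) := rfl
    rw [hstep, PySem.List.pyRange_one_succ_right (by push_cast; omega : b - ((f:Nat)+1:Nat) ≤ b),
      List.filter_append]
    simp only [List.filter_cons, List.filter_nil]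
    by_cases hp : is_prime_fast b
    · simp [hp]
    · rw [if_neg (by simp [hp]), if_neg (by simp [hp]), List.append_nil]
      have harg : b - (((f:Nat)+1:Nat) : Int) = (b - 1) - (f:Nat) := by push_cast; ring
      have hIH := ih (b-1) (by rw [show (b-1) - (f:Nat) = b - (((f:Nat)+1:Nat):Int) from by push_cast; ring]; exact hb)
      rw [show (b-1) + 1 = b from by ring] at hIH
      rw [harg, hIH]

-- numbers below 2 are never prime
theorem is_prime_lt_two (x : Int) (hx : x < 2) : is_prime x = false := by
  simp [is_prime, hx]

-- dropping the sub-2 head of the range does not change the primes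
theorem filter_max2 (start end_ : Int) :
    (PySem.List.pyRange start (end_ + 1) 1).filter is_prime
      = (PySem.List.pyRange (max start 2) (end_ + 1) 1).filter is_prime := by
  rcases le_or_gt 2 start with hs | hs
  · rw [max_eq_left hs]
  · rw [max_eq_right (by omega)]
    rcases le_or_gt (end_ + 1) 2 with he | he
    · rw [PySem.List.pyRange_one_eq_nil he, List.filter_nil, List.filter_eq_nil_iff]
      intro x hx
      rw [PySem.List.mem_pyRange_one] at hx
      simp [is_prime_lt_two x (by omega)]
    · rw [PySem.List.pyRange_one_append start 2 (end_ + 1) (by omega) (by omega), List.filter_append]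
      have : (PySem.List.pyRange start 2 1).filter is_prime = [] := by
        rw [List.filter_eq_nil_iff]
        intro x hx
        rw [PySem.List.mem_pyRange_one] at hx
        simp [is_prime_lt_two x (by omega)]
      rw [this, List.nil_append]

-- a fuel of (b-a).toNat makes the scan window exactly [a, b)
theorem range_toNat (a b : Int) :
    PySem.List.pyRange a (a + ((b - a).toNat : Int)) 1 = PySem.List.pyRange a b 1 := by
  rcases le_or_gt a b with h | h
  · rw [Int.toNat_of_nonneg (by omega)]; ring_nf
  · rw [Int.toNat_of_nonpos (by omega)]
    rw [PySem.List.pyRange_one_eq_nil (by omega), PySem.List.pyRange_one_eq_nil (by omega)]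

-- ===== VERDICT (by name: the statement is the Claim_ definition above) =====
theorem sum_prime_spec : Claim_equal_sum_prime := by
  intro start end_ _
  simp only [Spec_sum_prime, sum_prime, sum_prime_alt]
  rw [PySem.List.foldl_append_if_eq_filter, List.nil_append, filter_max2 start end_]
  rw [scanUp_eq, range_toNat, isp_fun_eq]
  cases hL : (PySem.List.pyRange (max start 2) (end_ + 1) 1).filter is_prime with
  | nil => simp
  | cons p rest =>
    simp only [List.isEmpty_cons, if_neg Bool.false_ne_true, List.head?_cons, List.headD_cons]
    have hpmem : p ∈ (PySem.List.pyRange (max start 2) (end_ + 1) 1).filter is_prime := by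
      rw [hL]; exact List.mem_cons_self
    have hpp : is_prime p = true := (List.mem_filter.mp hpmem).2
    have hpr := (List.mem_filter.mp hpmem).1
    rw [PySem.List.mem_pyRange_one] at hpr
    have hple : p ≤ end_ := by omega
    have hcast : ((end_ - p).toNat : Int) = end_ - p := Int.toNat_of_nonneg (by omega)
    have hbase : is_prime_fast (end_ - ((end_ - p).toNat : Int)) = true := by
      rw [hcast, show end_ - (end_ - p) = p from by ring, isp_eq]; exact hpp
    rw [scanDown_eq _ end_ hbase, hcast, show end_ - (end_ - p) = p from by ring, isp_fun_eq]
    -- split the filtered range at p: nothing before p survives the filter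
    have hsplit : (PySem.List.pyRange (max start 2) (end_ + 1) 1).filter is_prime
        = (PySem.List.pyRange (max start 2) p 1).filter is_prime
          ++ (PySem.List.pyRange p (end_ + 1) 1).filter is_prime := by
      rw [← List.filter_append, ← PySem.List.pyRange_one_append _ p _ (by omega) (by omega)]
    have hpre : (PySem.List.pyRange (max start 2) p 1).filter is_prime = [] := by
      cases hq : (PySem.List.pyRange (max start 2) p 1).filter is_prime with
      | nil => rfl
      | cons q t =>
        exfalso
        have hqmem : q ∈ (PySem.List.pyRange (max start 2) p 1).filter is_prime := by
          rw [hq]; exact List.mem_cons_self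
        have := (List.mem_filter.mp hqmem).1
        rw [PySem.List.mem_pyRange_one] at this
        have : q < p := this.2
        have hhd : p = q := by
          have := hsplit.symm.trans hL
          rw [hq, List.cons_append] at this
          exact (List.cons.injEq _ _ _ _ ▸ this.symm) |>.1
        omega
    have hlast : rest.getLastD p = ((PySem.List.pyRange p (end_ + 1) 1).filter is_prime).getLastD 0 := by
      have h2 := hsplit.symm.trans hL
      rw [hpre, List.nil_append] at h2
      rw [h2]
      exact List.getLastD_cons.symm
    rw [← hlast]
    rw [List.getLastD_cons]
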